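-- pv_equiv track=rewrite | github.com/bluebear78/algorithms | 프로그래머스/lv2/118667. 두 큐 합 같게 만들기/두 큐 합 같게 만들기.py | solution
-- ===== SOURCE A (Python) =====
-- from collections import deque
--
-- def solution(queue1, queue2):
--     answer = 0
--     queue1 = deque(queue1)
--     queue2 = deque(queue2)
--
--     maximium = len(queue1)+len(queue2)
--     while True:
--         sum_1 = sum(queue1)
--         sum_2 = sum(queue2)
--
--         if answer>maximium:
--             return -1
--
--         if sum_1 == sum_2:
--             break
--         elif sum_1 < sum_2:
--             temp = queue2.popleft()
--             queue1.append(temp)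
--         else:
--             temp = queue1.popleft()
--             queue2.append(temp)
--         answer+=1
--
--
--
--
--
--     return answer
-- ===== SOURCE B (Python) =====
-- def solution(queue1, queue2):
--     c = queue1 + queue2
--     n = len(c)
--     s1 = sum(queue1)
--     total = s1 + sum(queue2)
--     i, j = 0, len(queue1)
--     for moves in range(n + 1):
--         if s1 == total - s1:
--             return moves
--         if s1 < total - s1:
--             s1 += c[j % n]
--             j += 1
--         else:
--             s1 -= c[i % n]
--             i += 1
--     return -1
-- ===== Notes on version B (the rewrite author's own statement) =====
-- stated objective: faster
-- what changed: Replaced the deque simulation that re-sums both queues on every iteration with a single two-pointer walk over the concatenated array that maintains the running sum of queue1 incrementally.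
-- outside the precondition, e.g. on solution([-6], [-2, 7, -8]): A returns -1, B returns -1; on solution([], [-1]): A raises IndexError, B returns -1
import Mathlib
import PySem

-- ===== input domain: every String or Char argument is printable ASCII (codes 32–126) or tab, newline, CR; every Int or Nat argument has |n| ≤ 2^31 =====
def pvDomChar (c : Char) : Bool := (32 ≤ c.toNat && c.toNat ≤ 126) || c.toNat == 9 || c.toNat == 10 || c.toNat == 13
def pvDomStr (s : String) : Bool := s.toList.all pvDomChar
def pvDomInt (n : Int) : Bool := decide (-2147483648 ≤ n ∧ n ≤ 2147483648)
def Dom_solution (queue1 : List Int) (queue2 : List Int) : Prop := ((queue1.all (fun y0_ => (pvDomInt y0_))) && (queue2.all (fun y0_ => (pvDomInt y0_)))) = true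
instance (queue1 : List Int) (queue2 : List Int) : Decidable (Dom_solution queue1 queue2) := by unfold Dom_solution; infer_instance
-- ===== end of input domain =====

-- B replaces A's repeated re-summing deque simulation by an O(n) two-pointer walk over the
-- concatenated array with incrementally maintained running sums (objective: faster, asymptotic).

-- ===== PORT A =====
-- Literal port of A's `while True` loop; `answer` grows each iteration and the
-- `answer > maximium` check bounds it, so fuel length+2 is never exhausted.
def solutionLoop (maxi : Int) (answer : Int) (q1 : List Int) (q2 : List Int) : Nat → Int
  | 0 => 0                                   -- unreachable: the answer > maxi check fires first
  | fuel+1 =>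
    let s1 := q1.sum
    let s2 := q2.sum
    if answer > maxi then -1
    else if s1 = s2 then answer
    else if s1 < s2 then
      match q2 with
      | [] => 0                              -- Python raises IndexError here; excluded by Pre_solution
      | t :: rest => solutionLoop maxi (answer + 1) (q1 ++ [t]) rest fuel
    else
      match q1 with
      | [] => 0                              -- Python raises IndexError here; excluded by Pre_solution
      | t :: rest => solutionLoop maxi (answer + 1) rest (q2 ++ [t]) fuel

def solution (queue1 : List Int) (queue2 : List Int) : Int :=
  solutionLoop ((queue1.length : Int) + (queue2.length : Int)) 0 queue1 queue2
    (queue1.length + queue2.length + 2)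

-- ===== PORT B =====
-- Literal port of Source B: `for moves in range(n+1)` becomes fuel recursion with a moves counter.
def solutionAltLoop (c : List Int) (total : Int) (s1 : Int) (i : Nat) (j : Nat) (moves : Int) :
    Nat → Int
  | 0 => -1
  | fuel+1 =>
    if s1 = total - s1 then moves
    else if s1 < total - s1 then
      solutionAltLoop c total (s1 + c.getD (j % c.length) 0) i (j + 1) (moves + 1) fuel
    else
      solutionAltLoop c total (s1 - c.getD (i % c.length) 0) (i + 1) j (moves + 1) fuel

def solution_alt (queue1 : List Int) (queue2 : List Int) : Int :=
  let c := queue1 ++ queue2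
  solutionAltLoop c (queue1.sum + queue2.sum) queue1.sum 0 queue1.length 0 (c.length + 1)

-- ===== PRECONDITION & SPEC =====
-- Pre_ excludes inputs whose total sum is negative (unless the two sums are already equal):
-- on part of those inputs A pops an empty deque and raises IndexError, and the region where
-- it instead happens to return -1 is not separable from the raising one in closed form.
def Pre_solution (queue1 : List Int) (queue2 : List Int) : Prop :=
  0 ≤ queue1.sum + queue2.sum ∨ queue1.sum = queue2.sum

instance (queue1 : List Int) (queue2 : List Int) : Decidable (Pre_solution queue1 queue2) := by
  unfold Pre_solution; infer_instance

def pvWitness_solution : List Int × List Int := ([1, 2], [3])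

def Spec_solution (queue1 : List Int) (queue2 : List Int) (out : Int) : Prop :=
  out = solution_alt queue1 queue2
instance (queue1 : List Int) (queue2 : List Int) (out : Int) : Decidable (Spec_solution queue1 queue2 out) := by unfold Spec_solution; infer_instance

-- ===== CLAIM (what is proved, stated in full; the proofs are below) =====
def Claim_equal_solution : Prop := ∀ (queue1 : List Int) (queue2 : List Int), Dom_solution queue1 queue2 → Pre_solution queue1 queue2 → Spec_solution queue1 queue2 (solution queue1 queue2)

-- ===== LEMMAS AND PROOFS =====

-- Sum of a rotation is the sum.
theorem sum_rotate_int (c : List Int) (i : Nat) : (c.rotate i).sum = c.sum :=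
  (List.rotate_perm c i).sum_eq

-- Element of c seen through the rotated window.
theorem getD_window (c : List Int) (i : Nat) (q : List Int) (h : q = c.rotate i)
    (k : Nat) (hk : k < q.length) :
    c.getD ((i + k) % c.length) 0 = q[k] := by
  subst h
  have hn : k < c.length := by simpa [List.length_rotate] using hk
  have hlt : (i + k) % c.length < c.length := Nat.mod_lt _ (by omega)
  rw [List.getD_eq_getElem c 0 hlt, List.getElem_rotate]
  congr 1
  rw [Nat.add_comm]

-- One-step unfolding of the two loops (definitional).
theorem solutionLoop_succ (maxi answer : Int) (q1 q2 : List Int) (fuel : Nat) :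
    solutionLoop maxi answer q1 q2 (fuel + 1)
      = (if answer > maxi then -1
         else if q1.sum = q2.sum then answer
         else if q1.sum < q2.sum then
           match q2 with
           | [] => 0
           | t :: rest => solutionLoop maxi (answer + 1) (q1 ++ [t]) rest fuel
         else
           match q1 with
           | [] => 0
           | t :: rest => solutionLoop maxi (answer + 1) rest (q2 ++ [t]) fuel) := rfl

theorem solutionAltLoop_succ (c : List Int) (total s1 : Int) (i j : Nat) (moves : Int)
    (fuel : Nat) :
    solutionAltLoop c total s1 i j moves (fuel + 1)
      = (if s1 = total - s1 then moves
         else if s1 < total - s1 then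
           solutionAltLoop c total (s1 + c.getD (j % c.length) 0) i (j + 1) (moves + 1) fuel
         else
           solutionAltLoop c total (s1 - c.getD (i % c.length) 0) (i + 1) j (moves + 1) fuel) := rfl

-- Core invariant: A's deque state (q1, q2) is the window of the two-pointer state.
theorem loop_eq (c : List Int) (hT : 0 ≤ c.sum) :
    ∀ (f : Nat) (i : Nat) (q1 q2 : List Int), q1 ++ q2 = c.rotate i →
      solutionLoop (c.length : Int) ((c.length : Int) + 1 - f) q1 q2 (f + 1)
        = solutionAltLoop c c.sum q1.sum i (i + q1.length) ((c.length : Int) + 1 - f) f := by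
  intro f
  induction f with
  | zero =>
    intro i q1 q2 _
    have h : ((c.length : Int) + 1 - ((0:Nat):Int)) > (c.length : Int) := by push_cast; omega
    rw [solutionLoop_succ, if_pos h]
    rfl
  | succ f ih =>
    intro i q1 q2 hrot
    have hsum : q1.sum + q2.sum = c.sum := by
      have := sum_rotate_int c i
      rw [← hrot] at this
      simpa [List.sum_append] using this
    have hnogt : ¬ ((c.length : Int) + 1 - ((f + 1 : Nat) : Int) > (c.length : Int)) := by
      push_cast [List.length_append]; omega
    rw [solutionLoop_succ, solutionAltLoop_succ, if_neg hnogt]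
    by_cases heq : q1.sum = q2.sum
    · rw [if_pos heq, if_pos (show q1.sum = c.sum - q1.sum by omega)]
    · rw [if_neg heq, if_neg (show ¬ q1.sum = c.sum - q1.sum by omega)]
      by_cases hlt : q1.sum < q2.sum
      · -- grow q1: pop from q2 (nonempty since its sum exceeds q1's and the total is ≥ 0)
        rw [if_pos hlt, if_pos (show q1.sum < c.sum - q1.sum by omega)]
        match q2, hsum, heq, hlt, hrot with
        | [], hsum, heq, hlt, hrot => exfalso; simp at hsum hlt; omega
        | t :: rest, hsum, heq, hlt, hrot =>
          have hk : q1.length < (q1 ++ t :: rest).length := by simp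
          have hget : c.getD ((i + q1.length) % c.length) 0 = t := by
            have := getD_window c i (q1 ++ t :: rest) hrot q1.length hk
            simpa using this
          rw [hget]
          have hrot2 : (q1 ++ [t]) ++ rest = c.rotate i := by
            simpa [List.append_assoc] using hrot
          have hih := ih i (q1 ++ [t]) rest hrot2
          have hans : ((c.length : Int) + 1 - ((f + 1 : Nat) : Int)) + 1
              = (c.length : Int) + 1 - ((f : Nat) : Int) := by push_cast; omega
          rw [hans]
          refine hih.trans ?_
          have h1 : (q1 ++ [t]).sum = q1.sum + t := by simp
          have h2 : i + (q1 ++ [t]).length = i + q1.length + 1 := by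
            simp only [List.length_append, List.length_cons, List.length_nil]; omega
          rw [h1, h2]
      · -- shrink q1: pop from q1 (nonempty since its sum exceeds q2's and the total is ≥ 0)
        rw [if_neg hlt, if_neg (show ¬ q1.sum < c.sum - q1.sum by omega)]
        match q1, hsum, heq, hlt, hrot with
        | [], hsum, heq, hlt, hrot => exfalso; simp at hsum heq hlt; omega
        | t :: rest, hsum, heq, hlt, hrot =>
          have hk : 0 < (t :: rest ++ q2).length := by simp
          have hget : c.getD (i % c.length) 0 = t := by
            have := getD_window c i (t :: rest ++ q2) hrot 0 hk
            simpa using this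
          rw [hget]
          have hrot2 : rest ++ (q2 ++ [t]) = c.rotate (i + 1) := by
            rw [← List.rotate_rotate, ← hrot]
            simp [List.append_assoc]
          have hih := ih (i + 1) rest (q2 ++ [t]) hrot2
          have hans : ((c.length : Int) + 1 - ((f + 1 : Nat) : Int)) + 1
              = (c.length : Int) + 1 - ((f : Nat) : Int) := by push_cast; omega
          rw [hans]
          refine hih.trans ?_
          have h1 : (t :: rest).sum - t = rest.sum := by simp
          have h2 : i + (t :: rest).length = i + 1 + rest.length := by
            simp only [List.length_cons]; omega
          rw [h1, h2]

-- ===== VERDICT (by name: the statement is the Claim_ definition above) =====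
theorem solution_spec : Claim_equal_solution := by
  intro queue1 queue2 _ hpre
  unfold Spec_solution solution solution_alt
  rcases hpre with hT | heq
  · -- total sum nonnegative: the two-pointer walk tracks the deque simulation step for step
    have hc : queue1 ++ queue2 = (queue1 ++ queue2).rotate 0 := by simp
    have hT2 : 0 ≤ (queue1 ++ queue2).sum := by simpa [List.sum_append] using hT
    have hmain := loop_eq (queue1 ++ queue2) hT2 (queue1.length + queue2.length + 1) 0
      queue1 queue2 hc
    have hans : (((queue1 ++ queue2).length : Int) + 1
        - ((queue1.length + queue2.length + 1 : Nat) : Int)) = 0 := by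
      push_cast [List.length_append]; omega
    rw [hans] at hmain
    simpa [List.sum_append, List.length_append] using hmain
  · -- sums already equal: both return 0 on the very first check
    have hA : ¬ ((0:Int) > (queue1.length : Int) + (queue2.length : Int)) := by omega
    show solutionLoop _ _ _ _ (queue1.length + queue2.length + 2) = _
    rw [solutionLoop_succ, if_neg hA, if_pos heq]
    rw [solutionAltLoop_succ,
      if_pos (show queue1.sum = queue1.sum + queue2.sum - queue1.sum by omega)]
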